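-- pv_equiv track=rewrite | github.com/insaiyancvk/datalocker | datalocker/decryption_functions.py | dec_fun6
-- ===== SOURCE A (Python) =====
-- def dec_fun6(plain_text):
--     a=plain_text
--     b=(a[::-1])
--     nstr=[]
--     for i in range (len(b)):
--         if ord(b[i])>=33 and ord(b[i])<=62:
--             nstr.append(chr(ord(b[i])+64))
--         else:
--             nstr.append(b[i])
--     return(''.join(str(i) for i in nstr))
-- ===== SOURCE B (Python) =====
-- def dec_fun6(plain_text):
--     acc = ""
--     for ch in plain_text:
--         acc = chr(ord(ch) + 64 * (33 <= ord(ch) <= 62)) + acc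
--     return acc
-- ===== Notes on version B (the rewrite author's own statement) =====
-- stated objective: simpler
-- what changed: Instead of reversing the string and then index-looping with a per-character if/else into an appended list, B makes one forward pass prepending each character to the accumulator (no reversal pass) and replaces the branch by branchless arithmetic ord(ch) + 64*(33 <= ord(ch) <= 62).
import Mathlib
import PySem

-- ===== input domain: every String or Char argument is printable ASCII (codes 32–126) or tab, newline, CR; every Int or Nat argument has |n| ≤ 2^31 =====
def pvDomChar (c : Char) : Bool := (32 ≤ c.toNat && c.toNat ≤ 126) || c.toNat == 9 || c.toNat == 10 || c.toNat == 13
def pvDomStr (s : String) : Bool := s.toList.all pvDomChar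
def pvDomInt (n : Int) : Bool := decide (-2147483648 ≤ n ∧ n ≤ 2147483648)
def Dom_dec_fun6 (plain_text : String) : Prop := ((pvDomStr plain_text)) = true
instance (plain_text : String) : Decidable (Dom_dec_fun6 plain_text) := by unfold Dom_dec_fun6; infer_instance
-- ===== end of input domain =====

-- B replaces A's reverse-then-index-loop-with-branch by one forward pass that prepends
-- each branchlessly shifted character to the accumulator (simpler; return value only).

-- ===== PORT A =====
-- a[::-1] on a string is exactly the reversed code-point list
def dec_fun6 (plain_text : String) : String :=
  let a := plain_text
  let b := a.toList.reverse
  let nstr := (PySem.List.pyRange 0 (b.length : Int) 1).foldl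
    (fun acc i =>
      let ch := PySem.List.pyGetD b i ' '
      if 33 ≤ ch.toNat ∧ ch.toNat ≤ 62 then
        acc ++ [Char.ofNat (ch.toNat + 64)]
      else
        acc ++ [ch]) []
  String.ofList nstr

-- ===== PORT B =====
-- forward pass; 64 * (33 <= ord(ch) <= 62) is the Python bool-as-int product
def dec_fun6_alt (plain_text : String) : String :=
  String.ofList (plain_text.toList.foldl
    (fun acc ch =>
      Char.ofNat (ch.toNat + 64 * (if 33 ≤ ch.toNat ∧ ch.toNat ≤ 62 then 1 else 0)) :: acc)
    [])

-- ===== PRECONDITION & SPEC =====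
def Spec_dec_fun6 (plain_text : String) (out : String) : Prop := out = dec_fun6_alt plain_text
instance (plain_text : String) (out : String) : Decidable (Spec_dec_fun6 plain_text out) := by unfold Spec_dec_fun6; infer_instance

-- ===== CLAIM (what is proved, stated in full; the proofs are below) =====
def Claim_equal_dec_fun6 : Prop := ∀ (plain_text : String), Dom_dec_fun6 plain_text → Spec_dec_fun6 plain_text (dec_fun6 plain_text)

-- ===== LEMMAS AND PROOFS =====

theorem dec_fun6_eq_map (plain_text : String) :
    dec_fun6 plain_text = String.ofList (plain_text.toList.reverse.map
      (fun ch => if 33 ≤ ch.toNat ∧ ch.toNat ≤ 62 then Char.ofNat (ch.toNat + 64) else ch)) := by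
  unfold dec_fun6
  dsimp only
  rw [PySem.List.foldl_pyRange_zero_pyGetD' plain_text.toList.reverse ' '
        (fun acc ch => if 33 ≤ ch.toNat ∧ ch.toNat ≤ 62 then
            acc ++ [Char.ofNat (ch.toNat + 64)] else acc ++ [ch]) []]
  congr 1
  have h : List.foldl
      (fun (acc : List Char) ch => if 33 ≤ ch.toNat ∧ ch.toNat ≤ 62 then
          acc ++ [Char.ofNat (ch.toNat + 64)] else acc ++ [ch]) []
      plain_text.toList.reverse
    = List.foldl (fun acc ch =>
        acc ++ [if 33 ≤ ch.toNat ∧ ch.toNat ≤ 62 then Char.ofNat (ch.toNat + 64) else ch]) []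
      plain_text.toList.reverse := by
    congr 1
    funext acc ch
    split_ifs <;> rfl
  rw [h, PySem.List.foldl_append_singleton_eq_map, List.nil_append]

-- the prepending fold produces the reversed image of the list
theorem foldl_cons_eq_reverse_map {α β : Type} (f : α → β) :
    ∀ (l : List α) (acc : List β),
      List.foldl (fun acc ch => f ch :: acc) acc l = (l.map f).reverse ++ acc := by
  intro l
  induction l with
  | nil => intro acc; simp
  | cons x xs ih => intro acc; simp [List.foldl, ih]

-- ===== VERDICT (by name: the statement is the Claim_ definition above) =====
theorem dec_fun6_spec : Claim_equal_dec_fun6 := by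
  intro s _
  unfold Spec_dec_fun6 dec_fun6_alt
  rw [dec_fun6_eq_map, foldl_cons_eq_reverse_map]
  congr 1
  rw [List.append_nil, ← List.map_reverse]
  apply List.map_congr_left
  intro ch _
  split_ifs with h
  · simp
  · simp
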